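-- pv_equiv track=rewrite | github.com/pandorina1013/CursorSlideGenerator | marp_formatter.py | _enhance_formatting
-- ===== SOURCE A (Python) =====
-- def _enhance_formatting(content: str) -> str:
--     """Enhance content formatting for better slide presentation"""
--     lines = content.split('\n')
--     enhanced_lines = []
--
--     for line in lines:
--         # Make headers more prominent
--         if line.startswith('# '):
--             enhanced_lines.append(line)
--             enhanced_lines.append('')  # Add space after main headers
--         elif line.startswith('## '):
--             if enhanced_lines and enhanced_lines[-1] != '':
--                 enhanced_lines.append('')  # Add space before subheaders
--             enhanced_lines.append(line)
--         elif line.startswith('- ') or line.startswith('* '):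
--             # Ensure bullet points have proper spacing
--             enhanced_lines.append(line)
--         elif line.startswith('```'):
--             # Code blocks
--             if enhanced_lines and enhanced_lines[-1] != '':
--                 enhanced_lines.append('')
--             enhanced_lines.append(line)
--         else:
--             enhanced_lines.append(line)
--
--     # Clean up multiple empty lines
--     final_lines = []
--     prev_empty = False
--     for line in enhanced_lines:
--         if not line.strip():
--             if not prev_empty:
--                 final_lines.append(line)
--             prev_empty = True
--         else:
--             final_lines.append(line)
--             prev_empty = False
--
--     return '\n'.join(final_lines)
-- ===== SOURCE B (Python) =====
-- def _enhance_formatting(content: str) -> str: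
--     """Single pass: emit lines through a blank-collapsing guard while deciding spacing inline."""
--     out = []
--     prev_blank = False
--
--     def emit(line):
--         nonlocal prev_blank
--         if line.strip():
--             out.append(line)
--             prev_blank = False
--         elif not prev_blank:
--             out.append(line)
--             prev_blank = True
--         else:
--             prev_blank = True
--
--     for line in content.split('\n'):
--         if line.startswith('# '):
--             emit(line)
--             emit('')  # space after main headers
--         elif line.startswith('## ') or line.startswith('```'):
--             if out:
--                 emit('')  # space before subheaders / code blocks (guard collapses duplicates)
--             emit(line)
--         else:
--             emit(line)
--
--     return '\n'.join(out)
-- ===== Notes on version B (the rewrite author's own statement) =====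
-- stated objective: simpler
-- what changed: A builds the spaced line buffer in one loop and collapses duplicate blank lines in a second loop; B is a single pass that routes every would-be output line through an inline blank-collapsing emit guard tracking whether the last emitted line was blank, so the second pass disappears.
import Mathlib
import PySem

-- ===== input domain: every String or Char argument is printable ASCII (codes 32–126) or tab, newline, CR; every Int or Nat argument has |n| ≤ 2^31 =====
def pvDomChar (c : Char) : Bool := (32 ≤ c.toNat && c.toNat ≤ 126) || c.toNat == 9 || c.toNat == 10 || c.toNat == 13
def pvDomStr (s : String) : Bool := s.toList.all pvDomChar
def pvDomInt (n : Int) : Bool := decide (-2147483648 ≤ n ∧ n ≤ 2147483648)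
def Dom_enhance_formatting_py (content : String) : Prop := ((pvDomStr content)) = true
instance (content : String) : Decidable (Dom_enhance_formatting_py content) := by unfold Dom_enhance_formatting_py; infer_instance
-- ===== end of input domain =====

-- B fuses A's two sequential passes into a single pass whose emit routine collapses blank lines inline (objective: simpler one-pass decomposition).

-- ===== PORT A =====
-- body of A's first loop (spacing around headers / code fences)
def pvAStep (acc : List String) (line : String) : List String :=
  if PySem.Str.startswith line "# " then acc ++ [line, ""]
  else if PySem.Str.startswith line "## " then
    (if acc.getLast?.any (· != "") then acc ++ ["", line] else acc ++ [line])
  else if PySem.Str.startswith line "- " || PySem.Str.startswith line "* " then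
    acc ++ [line]
  else if PySem.Str.startswith line "```" then
    (if acc.getLast?.any (· != "") then acc ++ ["", line] else acc ++ [line])
  else acc ++ [line]

-- body of A's second loop; state = (final_lines, prev_empty)
def pvCStep (s : List String × Bool) (line : String) : List String × Bool :=
  if PySem.Str.strip line == "" then
    (if s.2 then s.1 else s.1 ++ [line], true)
  else (s.1 ++ [line], false)

def enhance_formatting_py (content : String) : String :=
  -- content.split('\n'): the separator is the literal nonempty "\n", so split? is always some
  let lines := (PySem.Str.split? content "\n").getD []
  let enhanced_lines := List.foldl pvAStep [] lines
  let final_lines := (List.foldl pvCStep ([], false) enhanced_lines).1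
  PySem.Str.join "\n" final_lines

-- ===== PORT B =====
-- B's emit: append through a blank-collapsing guard; state = (out, prev_blank)
def pvEmit (s : List String × Bool) (line : String) : List String × Bool :=
  if PySem.Str.strip line != "" then (s.1 ++ [line], false)
  else if !s.2 then (s.1 ++ [line], true)
  else (s.1, true)

def pvBStep (s : List String × Bool) (line : String) : List String × Bool :=
  if PySem.Str.startswith line "# " then pvEmit (pvEmit s line) ""
  else if PySem.Str.startswith line "## " || PySem.Str.startswith line "```" then
    (if s.1 ≠ [] then pvEmit (pvEmit s "") line else pvEmit s line)
  else pvEmit s line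

def enhance_formatting_py_alt (content : String) : String :=
  PySem.Str.join "\n"
    ((List.foldl pvBStep ([], false) ((PySem.Str.split? content "\n").getD [])).1)

-- ===== PRECONDITION & SPEC =====
def Spec_enhance_formatting_py (content : String) (out : String) : Prop := out = enhance_formatting_py_alt content
instance (content : String) (out : String) : Decidable (Spec_enhance_formatting_py content out) := by unfold Spec_enhance_formatting_py; infer_instance

-- ===== CLAIM (what is proved, stated in full; the proofs are below) =====
def Claim_equal_enhance_formatting_py : Prop := ∀ (content : String), Dom_enhance_formatting_py content → Spec_enhance_formatting_py content (enhance_formatting_py content)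

-- ===== LEMMAS AND PROOFS =====

-- B's emit is extensionally A's collapse step (branches tested in the opposite order)
theorem pvEmit_eq_cstep (s : List String × Bool) (l : String) : pvEmit s l = pvCStep s l := by
  rcases s with ⟨a, b⟩
  unfold pvEmit pvCStep
  cases h : PySem.Str.strip l == "" <;> cases b <;> simp [bne, h]

-- the collapse step never empties a nonempty buffer, and appends whenever prev_empty was false
theorem pvCStep_fst_ne (s : List String × Bool) (l : String)
    (h : s.2 = true → s.1 ≠ []) : (pvCStep s l).1 ≠ [] := by
  rcases s with ⟨a, b⟩
  unfold pvCStep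
  cases hb : PySem.Str.strip l == "" <;> cases hbb : b <;> simp_all

-- collapse invariant: prev_empty = true forces a nonempty output buffer
theorem pvC_inv (enh : List String) :
    (List.foldl pvCStep ([], false) enh).2 = true → (List.foldl pvCStep ([], false) enh).1 ≠ [] := by
  suffices h : ∀ (l : List String) (s : List String × Bool), (s.2 = true → s.1 ≠ []) →
      (List.foldl pvCStep s l).2 = true → (List.foldl pvCStep s l).1 ≠ [] by
    exact h enh ([], false) (by simp)
  intro l
  induction l with
  | nil => intro s hs; exact hs
  | cons x xs ih =>
      intro s hs
      refine ih (pvCStep s x) ?_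
      intro _; exact pvCStep_fst_ne s x hs

theorem pvCStep_snd (s : List String × Bool) (l : String) :
    (pvCStep s l).2 = (PySem.Str.strip l == "") := by
  unfold pvCStep
  cases hb : PySem.Str.strip l == "" <;> simp

-- collapsing a blank line is a no-op when prev_empty is already set
theorem pvCStep_skip (s : List String × Bool) (h : s.2 = true) : pvCStep s "" = s := by
  rcases s with ⟨a, b⟩
  unfold pvCStep
  simp at h
  simp [h, show (PySem.Str.strip "" == "") = true from by decide]

-- a bullet line is never a code fence (first characters differ)
theorem pv_dash_not_fence (line : String) (p : String)
    (hp : PySem.Str.startswith line p = true)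
    (hne : ∀ t1 t2 : List Char, p.toList ++ t1 ≠ "```".toList ++ t2) :
    PySem.Str.startswith line "```" = false := by
  cases hf : PySem.Str.startswith line "```"
  · rfl
  · exfalso
    have h1 := (PySem.Chars.startswith_iff _ _).1 (by simpa using hp)
    have h2 := (PySem.Chars.startswith_iff _ _).1 (by simpa using hf)
    rcases h1 with ⟨t1, ht1⟩
    rcases h2 with ⟨t2, ht2⟩
    exact hne t1 t2 (ht1.trans ht2.symm)

-- crux: collapsing A's buffer after one A-step = one B-step on the collapsed state
theorem pv_crux (enh : List String) (line : String) :
    List.foldl pvCStep ([], false) (pvAStep enh line)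
      = pvBStep (List.foldl pvCStep ([], false) enh) line := by
  have hguard : ∀ (l : String),
      List.foldl pvCStep ([], false) (if enh.getLast?.any (· != "") then enh ++ ["", l] else enh ++ [l])
        = (if (List.foldl pvCStep ([], false) enh).1 ≠ [] then
            pvEmit (pvEmit (List.foldl pvCStep ([], false) enh) "") l
          else pvEmit (List.foldl pvCStep ([], false) enh) l) := by
    intro l
    rcases List.eq_nil_or_concat enh with rfl | ⟨ys, x, rfl⟩
    · simp [List.foldl, pvEmit_eq_cstep]
    simp only [List.concat_eq_append]
    have hC : List.foldl pvCStep ([], false) (ys ++ [x]) = pvCStep (List.foldl pvCStep ([], false) ys) x := by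
      simp [List.foldl_append]
    have hne : (List.foldl pvCStep ([], false) (ys ++ [x])).1 ≠ [] := by
      rw [hC]; exact pvCStep_fst_ne _ _ (pvC_inv ys)
    rw [if_pos hne]
    by_cases hx : x = ""
    · subst hx
      rw [if_neg (by simp)]
      have hS2 : (List.foldl pvCStep ([], false) (ys ++ [""])).2 = true := by
        rw [hC, pvCStep_snd]; decide
      rw [pvEmit_eq_cstep, pvEmit_eq_cstep, pvCStep_skip _ hS2]
      simp [List.foldl_append]
    · rw [if_pos (by simp [hx])]
      simp [List.foldl_append, pvEmit_eq_cstep]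
  unfold pvAStep pvBStep
  cases h1 : PySem.Str.startswith line "# "
  case true => simp [List.foldl_append, pvEmit_eq_cstep]
  case false =>
  cases h2 : PySem.Str.startswith line "## "
  case true =>
    simp only [Bool.true_or, reduceIte]
    exact hguard line
  case false =>
  cases h3 : (PySem.Str.startswith line "- " || PySem.Str.startswith line "* ")
  case true =>
    have h4 : PySem.Str.startswith line "```" = false := by
      rcases Bool.or_eq_true_iff.1 h3 with hd | hs
      · exact pv_dash_not_fence line "- " hd (by intro t1 t2 h; simp at h)
      · exact pv_dash_not_fence line "* " hs (by intro t1 t2 h; simp at h)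
    simp only [h4, Bool.false_or, reduceIte]
    simp [List.foldl_append, pvEmit_eq_cstep]
  case false =>
  cases h4 : PySem.Str.startswith line "```"
  case true =>
    simp only [Bool.false_or, reduceIte]
    exact hguard line
  case false =>
    simp only [Bool.false_or]
    simp [List.foldl_append, pvEmit_eq_cstep]

theorem pv_main (lines : List String) (enh : List String) :
    List.foldl pvCStep ([], false) (List.foldl pvAStep enh lines)
      = List.foldl pvBStep (List.foldl pvCStep ([], false) enh) lines := by
  induction lines generalizing enh with
  | nil => rfl
  | cons l ls ih =>
      simp only [List.foldl_cons]
      rw [ih (pvAStep enh l), pv_crux]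

-- ===== VERDICT (by name: the statement is the Claim_ definition above) =====
theorem enhance_formatting_py_spec : Claim_equal_enhance_formatting_py := by
  intro content _
  simp only [Spec_enhance_formatting_py, enhance_formatting_py, enhance_formatting_py_alt]
  rw [pv_main ((PySem.Str.split? content "\n").getD []) []]
  rfl
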